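-- pv_equiv track=rewrite | github.com/IROCX/InterviewCodingQuestionsPractice | Day 33 - minimumOperationsToConvertArrayAToB.py | minInsAndDel
-- ===== SOURCE A (Python) =====
-- from collections import Counter
--
-- def bs(arr, k):
--
--     l = 0
--     r = len(arr) - 1
--     ans = -1
--
--     while l <= r:
--         mid = (l + r) // 2
--
--         if arr[mid] < k:
--
--             l = mid + 1
--         else:
--             ans = mid
--             r = mid - 1
--     return ans
--
-- def minInsAndDel(A, B, N, M):
--
--     d = Counter(B)
--     temp = []
--
--     for i in range(N):
--         if d[A[i]]:
--             temp.append(A[i])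
--
--     res = []
--
--     for i in temp:
--         ind = bs(res, i)
--         if ind == -1:
--             res.append(i)
--         else:
--             res[ind] = i
--
--     return M + N - 2 * len(res)
-- ===== SOURCE B (Python) =====
-- def minInsAndDel(A, B, N, M):
--     present = set(B)
--     temp = [A[i] for i in range(N) if A[i] in present]
--
--     dp = []
--     for x in temp:
--         best = 0
--         for y, d in zip(temp, dp):  # zip truncates to the processed prefix
--             if y < x and d > best:
--                 best = d
--         dp.append(best + 1)
--
--     lis = max(dp) if dp else 0
--     return M + N - 2 * lis
-- ===== Notes on version B (the rewrite author's own statement) =====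
-- stated objective: simpler
-- what changed: Replaces the hand-written binary-search patience-sorting LIS (tails array updated via a lower-bound search) with the textbook quadratic dynamic program dp[i] = 1 + max(dp[j] : j < i, temp[j] < temp[i]), taking max(dp) as the LIS length; the B-membership filter uses a plain set instead of a Counter.
import Mathlib
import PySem

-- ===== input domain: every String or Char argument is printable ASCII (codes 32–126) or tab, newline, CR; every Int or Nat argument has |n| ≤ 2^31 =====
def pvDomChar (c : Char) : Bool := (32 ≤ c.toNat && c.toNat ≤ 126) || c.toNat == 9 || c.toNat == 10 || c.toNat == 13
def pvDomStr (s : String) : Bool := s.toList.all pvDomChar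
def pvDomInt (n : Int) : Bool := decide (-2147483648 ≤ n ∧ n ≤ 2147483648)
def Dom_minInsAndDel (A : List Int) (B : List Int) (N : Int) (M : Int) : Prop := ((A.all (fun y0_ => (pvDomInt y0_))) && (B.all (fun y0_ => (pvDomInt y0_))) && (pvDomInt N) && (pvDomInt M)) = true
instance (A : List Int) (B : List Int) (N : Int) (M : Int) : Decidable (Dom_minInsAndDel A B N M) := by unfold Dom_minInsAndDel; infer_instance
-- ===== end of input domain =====

-- B replaces A's binary-search patience-sorting LIS with the textbook quadratic
-- LIS dynamic program (and a plain set instead of a Counter for the filter); the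
-- objective is a simpler, plainer implementation, not speed.

-- ===== PORT A =====

-- the 'while l <= r' loop of bs, state (l, r, ans)
def bsLoop (arr : List Int) (k : Int) (l r ans : Int) : Int :=
  if h : l ≤ r then
    match PySem.List.pyGet? arr (PySem.Int.floordiv (l + r) 2) with
    | none => ans  -- Python would raise IndexError; never reached for 0 ≤ l, r < len arr
    | some v =>
      if v < k then bsLoop arr k (PySem.Int.floordiv (l + r) 2 + 1) r ans
      else bsLoop arr k l (PySem.Int.floordiv (l + r) 2 - 1) (PySem.Int.floordiv (l + r) 2)
  else ans
termination_by (r + 1 - l).toNat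
decreasing_by
  all_goals
    have hb := PySem.Int.floordiv_two_mid_bounds h
    omega

def bs (arr : List Int) (k : Int) : Int :=
  bsLoop arr k 0 ((arr.length : Int) - 1) (-1)

-- one iteration of A's 'for i in temp' loop
def patStep (res : List Int) (i : Int) : List Int :=
  let ind := bs res i
  if ind = -1 then res ++ [i]
  else PySem.List.pySetD res ind i  -- res[ind] = i; here 0 ≤ ind < len res, so exact

-- 'temp = []; for i in range(N): if d[A[i]]: temp.append(A[i])'
def filterA (d : PySem.Dict Int Int) (A : List Int) (N : Int) : List Int :=
  (PySem.List.pyRange 0 N 1).foldl (fun temp i =>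
    match PySem.List.pyGet? A i with
    | none => temp  -- Python raises IndexError here; excluded by Pre_
    | some x => if d.getD x 0 ≠ 0 then temp ++ [x] else temp) []

def minInsAndDel (A : List Int) (B : List Int) (N : Int) (M : Int) : Int :=
  let d := PySem.Dict.counter B
  let temp := filterA d A N
  let res := temp.foldl patStep []
  M + N - 2 * (res.length : Int)

-- ===== PORT B =====

-- 'best = 0; for y, d in zip(temp, dp): if y < x and d > best: best = d'
def bestOf (P : List (Int × Int)) (x : Int) : Int :=
  P.foldl (fun best p => if p.1 < x ∧ p.2 > best then p.2 else best) 0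

-- one iteration of B's 'for x in temp' loop: dp.append(best + 1)
def dpStep (temp : List Int) (dp : List Int) (x : Int) : List Int :=
  dp ++ [bestOf (temp.zip dp) x + 1]

-- 'temp = [A[i] for i in range(N) if A[i] in present]'
def filterB (present : PySem.Set Int) (A : List Int) (N : Int) : List Int :=
  (PySem.List.pyRange 0 N 1).foldl (fun temp i =>
    match PySem.List.pyGet? A i with
    | none => temp  -- Python raises IndexError here; excluded by Pre_
    | some x => if present.contains x then temp ++ [x] else temp) []

def minInsAndDel_alt (A : List Int) (B : List Int) (N : Int) (M : Int) : Int :=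
  let present := PySem.Set.ofList B
  let temp := filterB present A N
  let dp := temp.foldl (dpStep temp) []
  let lis := if dp.isEmpty then 0 else (PySem.List.max? dp (fun v => v)).getD 0
  M + N - 2 * lis

-- ===== PRECONDITION & SPEC =====
-- Pre_ excludes exactly the inputs where Python A raises IndexError: N > len(A)
-- makes 'A[i]' fail inside the filtering loop (B fails there identically).
def Pre_minInsAndDel (A : List Int) (B : List Int) (N : Int) (M : Int) : Prop :=
  N ≤ (A.length : Int)
instance (A : List Int) (B : List Int) (N : Int) (M : Int) : Decidable (Pre_minInsAndDel A B N M) := by unfold Pre_minInsAndDel; infer_instance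

def pvWitness_minInsAndDel : List Int × List Int × Int × Int := ([1, 3, 2], [2, 3], 3, 2)

def Spec_minInsAndDel (A : List Int) (B : List Int) (N : Int) (M : Int) (out : Int) : Prop := out = minInsAndDel_alt A B N M
instance (A : List Int) (B : List Int) (N : Int) (M : Int) (out : Int) : Decidable (Spec_minInsAndDel A B N M out) := by unfold Spec_minInsAndDel; infer_instance

-- ===== CLAIM (what is proved, stated in full; the proofs are below) =====
def Claim_equal_minInsAndDel : Prop := ∀ (A : List Int) (B : List Int) (N : Int) (M : Int), Dom_minInsAndDel A B N M → Pre_minInsAndDel A B N M → Spec_minInsAndDel A B N M (minInsAndDel A B N M)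

-- ===== LEMMAS AND PROOFS =====

-- The coupling invariant between B's dp values (as pairs P = zip prefix dp) and A's
-- tails list res: res is strictly increasing, every dp value lies in [1, len res],
-- res.getD j is a lower bound for elements whose dp value exceeds j, and each
-- res.getD j is realised by such a pair.
def LPInv (P : List (Int × Int)) (res : List Int) : Prop :=
  res.Pairwise (· < ·) ∧
  (∀ p ∈ P, 1 ≤ p.2 ∧ p.2 ≤ (res.length : Int) ∧
    ∀ j : Nat, (j : Int) + 1 ≤ p.2 → res.getD j 0 ≤ p.1) ∧
  (∀ j : Nat, j < res.length → ∃ p ∈ P, (j : Int) + 1 ≤ p.2 ∧ p.1 = res.getD j 0)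

lemma filter_eq (A B : List Int) (N : Int) :
    filterA (PySem.Dict.counter B) A N = filterB (PySem.Set.ofList B) A N := by
  unfold filterA filterB
  apply List.foldl_ext
  intro temp i _
  cases PySem.List.pyGet? A i with
  | none => rfl
  | some x =>
    by_cases hx : x ∈ B
    · have hc : List.count x B ≠ 0 := fun h => (List.count_eq_zero.mp h) hx
      simp [pysem, hx, hc]
    · simp [pysem, hx]

lemma sorted_char : ∀ (arr : List Int) (k : Int), arr.Pairwise (· < ·) →
    ∀ j (hj : j < arr.length),
      (arr[j] < k ↔ j < arr.countP (fun a => decide (a < k))) := by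
  intro arr k
  induction arr with
  | nil => intro _ j hj; simp at hj
  | cons a t ih =>
    intro hs j hj
    obtain ⟨ha, ht⟩ := List.pairwise_cons.mp hs
    rw [List.countP_cons]
    by_cases hak : a < k
    · cases j with
      | zero => simp [hak]
      | succ j =>
        have hj' : j < t.length := by simpa using hj
        have iht := ih ht j hj'
        simpa [hak] using iht
    · have ht0 : t.countP (fun a => decide (a < k)) = 0 := by
        rw [List.countP_eq_zero]
        intro b hb
        have := ha b hb
        simp only [decide_eq_true_eq]
        omega
      cases j with
      | zero => simp [hak, ht0]
      | succ j =>
        have hj' : j < t.length := by simpa using hj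
        have hnb : ¬ t[j]'hj' < k := by have := ha _ (List.getElem_mem hj'); omega
        simp [List.getElem_cons_succ, ht0, hak, hnb]
  
lemma bsLoop_correct (arr : List Int) (k : Int) (hs : arr.Pairwise (· < ·)) :
    ∀ (fuel : Nat) (l r ans : Int), (r + 1 - l).toNat ≤ fuel →
      0 ≤ l → r < (arr.length : Int) →
      l ≤ (arr.countP (fun a => decide (a < k)) : Int) →
      ((arr.countP (fun a => decide (a < k)) : Int) ≤ r ∨
        ans = (if (arr.countP (fun a => decide (a < k)) : Int) < (arr.length : Int)
               then (arr.countP (fun a => decide (a < k)) : Int) else -1)) →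
      bsLoop arr k l r ans =
        (if (arr.countP (fun a => decide (a < k)) : Int) < (arr.length : Int)
         then (arr.countP (fun a => decide (a < k)) : Int) else -1) := by
  set c := arr.countP (fun a => decide (a < k)) with hcdef
  intro fuel
  induction fuel with
  | zero =>
    intro l r ans hf h0 hr hlc hdisj
    have hlr : ¬ l ≤ r := by omega
    rw [bsLoop, dif_neg hlr]
    rcases hdisj with h | h
    · omega
    · exact h
  | succ fuel ih =>
    intro l r ans hf h0 hr hlc hdisj
    by_cases hlr : l ≤ r
    · have hmid := PySem.Int.floordiv_two_mid_bounds hlr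
      rw [bsLoop, dif_pos hlr]
      set mid := PySem.Int.floordiv (l + r) 2 with hm
      have h0m : 0 ≤ mid := by omega
      have hmlen : mid < (arr.length : Int) := by omega
      have hjm : mid.toNat < arr.length := by omega
      rw [PySem.List.pyGet?_eq_some_getElem arr h0m hmlen]
      simp only []
      have hch := sorted_char arr k hs mid.toNat hjm
      rw [← hcdef] at hch
      by_cases hv : arr[mid.toNat] < k
      · rw [if_pos hv]
        have hmc := hch.mp hv
        exact ih (mid + 1) r ans (by omega) (by omega) hr (by omega) hdisj
      · rw [if_neg hv]
        have hcm : ¬ mid.toNat < c := fun hh => hv (hch.mpr hh)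
        apply ih l (mid - 1) mid (by omega) h0 (by omega) hlc
        by_cases hcm1 : (c : Int) ≤ mid - 1
        · exact Or.inl hcm1
        · refine Or.inr ?_
          rw [if_pos (by omega)]
          omega
    · rw [bsLoop, dif_neg hlr]
      rcases hdisj with h | h
      · omega
      · exact h

lemma bs_eq (arr : List Int) (k : Int) (hs : arr.Pairwise (· < ·)) :
    bs arr k = (if (arr.countP (fun a => decide (a < k)) : Int) < (arr.length : Int)
                then (arr.countP (fun a => decide (a < k)) : Int) else -1) := by
  have hclen : arr.countP (fun a => decide (a < k)) ≤ arr.length := List.countP_le_length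
  unfold bs
  apply bsLoop_correct arr k hs arr.length 0 ((arr.length : Int) - 1) (-1)
    (by omega) (by omega) (by omega) (by omega)
  by_cases h : (arr.countP (fun a => decide (a < k)) : Int) < (arr.length : Int)
  · exact Or.inl (by omega)
  · exact Or.inr (by rw [if_neg h])

lemma bestOf_aux (x : Int) :
    ∀ (P : List (Int × Int)) (b : Int),
      b ≤ P.foldl (fun best p => if p.1 < x ∧ p.2 > best then p.2 else best) b ∧
      (P.foldl (fun best p => if p.1 < x ∧ p.2 > best then p.2 else best) b = b ∨
        ∃ p ∈ P, p.1 < x ∧ p.2 = P.foldl (fun best p => if p.1 < x ∧ p.2 > best then p.2 else best) b) ∧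
      (∀ p ∈ P, p.1 < x → p.2 ≤ P.foldl (fun best p => if p.1 < x ∧ p.2 > best then p.2 else best) b) := by
  intro P
  induction P with
  | nil => intro b; exact ⟨le_refl _, Or.inl rfl, by simp⟩
  | cons p P ih =>
    intro b
    simp only [List.foldl_cons]
    by_cases hcond : p.1 < x ∧ p.2 > b
    · rw [if_pos hcond]
      obtain ⟨ih1, ih2, ih3⟩ := ih p.2
      refine ⟨le_trans (le_of_lt hcond.2) ih1, ?_, ?_⟩
      · rcases ih2 with h | ⟨q, hq, hqx, hqe⟩
        · exact Or.inr ⟨p, by simp, hcond.1, h.symm⟩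
        · exact Or.inr ⟨q, List.mem_cons_of_mem _ hq, hqx, hqe⟩
      · intro q hq hqx
        rcases List.mem_cons.mp hq with rfl | hq'
        · exact ih1
        · exact ih3 q hq' hqx
    · rw [if_neg hcond]
      obtain ⟨ih1, ih2, ih3⟩ := ih b
      refine ⟨ih1, ?_, ?_⟩
      · rcases ih2 with h | ⟨q, hq, hqx, hqe⟩
        · exact Or.inl h
        · exact Or.inr ⟨q, List.mem_cons_of_mem _ hq, hqx, hqe⟩
      · intro q hq hqx
        rcases List.mem_cons.mp hq with rfl | hq'
        · have hqb : q.2 ≤ b := by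
            rcases not_and_or.mp hcond with h1 | h2
            · exact absurd hqx h1
            · omega
          exact le_trans hqb ih1
        · exact ih3 q hq' hqx

lemma inv_step (P : List (Int × Int)) (res : List Int) (x : Int) (h : LPInv P res) :
    LPInv (P ++ [(x, bestOf P x + 1)]) (patStep res x) := by
  obtain ⟨hsort, hlb, hwit⟩ := h
  obtain ⟨hb0, hbw, hbmax⟩ := bestOf_aux x P 0
  rw [show P.foldl (fun best p => if p.1 < x ∧ p.2 > best then p.2 else best) 0 = bestOf P x from rfl]
    at hb0 hbw hbmax
  set b := bestOf P x with hbdef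
  set c := res.countP (fun a => decide (a < x)) with hcdef
  have hclen : c ≤ res.length := List.countP_le_length
  have hchar := sorted_char res x hsort
  rw [← hcdef] at hchar
  have hblen : b ≤ (res.length : Int) := by
    rcases hbw with h0 | ⟨p, hp, _, hpe⟩
    · omega
    · have := (hlb p hp).2.1; omega
  have h1 : ∀ j : Nat, j < res.length → (j : Int) < b → j < c := by
    intro j hj hjb
    rcases hbw with h0 | ⟨p, hp, hpx, hpe⟩
    · omega
    · have hle := (hlb p hp).2.2 j (by omega)
      rw [List.getD_eq_getElem _ _ hj] at hle
      exact (hchar j hj).mp (by omega)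
  have h2 : ∀ j : Nat, j < res.length → j < c → (j : Int) < b := by
    intro j hj hjc
    obtain ⟨p, hp, hp2, hp1⟩ := hwit j hj
    have hx : res[j] < x := (hchar j hj).mpr hjc
    have hpx : p.1 < x := by rw [hp1, List.getD_eq_getElem _ _ hj]; exact hx
    have := hbmax p hp hpx
    omega
  have hcb : (c : Int) = b := by
    rcases lt_trichotomy ((c : Nat) : Int) b with hlt | heq | hgt
    · have := h1 c (by omega) hlt; omega
    · exact heq
    · have := h2 b.toNat (by omega) (by omega); omega
  unfold patStep
  rw [bs_eq res x hsort, ← hcdef]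
  by_cases hclt : (c : Int) < (res.length : Int)
  · -- res[c] gets overwritten by x
    rw [if_pos hclt, if_neg (by omega : ¬ ((c : Int) = -1)), PySem.List.pySetD_natCast]
    have hcl : c < res.length := by exact_mod_cast hclt
    have hresc : ¬ res[c] < x := fun hcon => absurd ((hchar c hcl).mp hcon) (lt_irrefl c)
    have hxle : x ≤ res[c] := by omega
    have hlt' : ∀ j (hj : j < res.length), j < c → res[j] < x := fun j hj hjc => (hchar j hj).mpr hjc
    have hlen' : (res.set c x).length = res.length := List.length_set
    have hget : ∀ j (hj : j < res.length),
        (res.set c x)[j]'(by omega) = if c = j then x else res[j] := by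
      intro j hj; simp [List.getElem_set]
    refine ⟨?_, ?_, ?_⟩
    · rw [List.pairwise_iff_getElem] at hsort ⊢
      intro i j hi hj hij
      rw [hlen'] at hi hj
      rw [hget i hi, hget j hj]
      split_ifs with hic hjc hjc
      · omega
      · subst hic
        exact lt_of_le_of_lt hxle (hsort _ _ hi hj hij)
      · subst hjc
        exact hlt' i hi (by omega)
      · exact hsort i j hi hj hij
    · intro p hp
      rcases List.mem_append.mp hp with hp | hp
      · obtain ⟨hp1, hp2, hp3⟩ := hlb p hp
        refine ⟨hp1, by omega, ?_⟩
        intro j hjp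
        have hj : j < res.length := by omega
        rw [List.getD_eq_getElem _ _ (by omega : j < (res.set c x).length), hget j hj]
        have hres := hp3 j hjp
        rw [List.getD_eq_getElem _ _ hj] at hres
        split_ifs with hcj
        · subst hcj; omega
        · exact hres
      · rw [List.mem_singleton] at hp
        subst hp
        refine ⟨by omega, by simpa [hlen'] using by omega, ?_⟩
        intro j hjp
        simp only at hjp
        have hj : j < res.length := by omega
        rw [List.getD_eq_getElem _ _ (by omega : j < (res.set c x).length), hget j hj]
        split_ifs with hcj
        · exact le_refl x
        · have hjc : j < c := by omega
          exact le_of_lt (hlt' j hj hjc)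
    · intro j hj
      rw [hlen'] at hj
      by_cases hcj : j = c
      · refine ⟨(x, b + 1), List.mem_append_right _ (List.mem_singleton.mpr rfl), by omega, ?_⟩
        have hgx : (res.set c x).getD j 0 = x := by
          rw [List.getD_eq_getElem _ _ (by omega : j < (res.set c x).length), hget j hj,
            if_pos hcj.symm]
        rw [hgx]
      · obtain ⟨p, hp, hp2, hp1⟩ := hwit j hj
        refine ⟨p, List.mem_append_left _ hp, hp2, ?_⟩
        rw [List.getD_eq_getElem _ _ (by omega : j < (res.set c x).length), hget j hj,
          if_neg (fun hh => hcj hh.symm)]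
        rw [List.getD_eq_getElem _ _ hj] at hp1
        exact hp1
  · -- x is appended
    rw [if_neg hclt, if_pos rfl]
    have hall : ∀ j (hj : j < res.length), res[j] < x := fun j hj => (hchar j hj).mpr (by omega)
    have hlen' : (res ++ [x]).length = res.length + 1 := by simp
    have hgetl : ∀ j (hj : j < res.length), (res ++ [x])[j]'(by omega) = res[j] := by
      intro j hj; exact List.getElem_append_left hj
    have hgetr : (res ++ [x])[res.length]'(by simp) = x := List.getElem_concat_length rfl _
    refine ⟨?_, ?_, ?_⟩
    · rw [List.pairwise_append]
      refine ⟨hsort, List.pairwise_singleton _ _, ?_⟩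
      intro a ha y hy
      rw [List.mem_singleton] at hy
      subst hy
      obtain ⟨j, hj, rfl⟩ := List.mem_iff_getElem.mp ha
      exact hall j hj
    · intro p hp
      rcases List.mem_append.mp hp with hp | hp
      · obtain ⟨hp1, hp2, hp3⟩ := hlb p hp
        refine ⟨hp1, by omega, ?_⟩
        intro j hjp
        have hj : j < res.length := by omega
        rw [List.getD_eq_getElem _ _ (by omega : j < (res ++ [x]).length), hgetl j hj]
        have hres := hp3 j hjp
        rw [List.getD_eq_getElem _ _ hj] at hres
        exact hres
      · rw [List.mem_singleton] at hp
        subst hp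
        refine ⟨by omega, by simpa [hlen'] using by omega, ?_⟩
        intro j hjp
        simp only at hjp
        have hj : j < res.length + 1 := by omega
        rw [List.getD_eq_getElem _ _ (by omega : j < (res ++ [x]).length)]
        by_cases hje : j < res.length
        · rw [hgetl j hje]
          exact le_of_lt (hall j hje)
        · have hjl : j = res.length := by omega
          subst hjl
          rw [hgetr]
    · intro j hj
      rw [hlen'] at hj
      by_cases hje : j < res.length
      · obtain ⟨p, hp, hp2, hp1⟩ := hwit j hje
        refine ⟨p, List.mem_append_left _ hp, hp2, ?_⟩
        rw [List.getD_eq_getElem _ _ (by omega : j < (res ++ [x]).length), hgetl j hje]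
        rw [List.getD_eq_getElem _ _ hje] at hp1
        exact hp1
      · have hjl : j = res.length := by omega
        subst hjl
        refine ⟨(x, b + 1), List.mem_append_right _ (List.mem_singleton.mpr rfl), by omega, ?_⟩
        rw [List.getD_eq_getElem _ _ (by omega : res.length < (res ++ [x]).length), hgetr]

lemma zip_append_left (pref rest dp : List Int) (h : dp.length = pref.length) :
    (pref ++ rest).zip dp = pref.zip dp := by
  have := List.zip_append (l₁ := pref) (r₁ := rest) (l₂ := dp) (r₂ := ([] : List Int)) h.symm
  simpa using this

lemma loop_bisim :
    ∀ (rest pref dp res : List Int),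
      dp.length = pref.length → LPInv (pref.zip dp) res →
      (rest.foldl (dpStep (pref ++ rest)) dp).length = pref.length + rest.length ∧
      LPInv ((pref ++ rest).zip (rest.foldl (dpStep (pref ++ rest)) dp))
          (rest.foldl patStep res) := by
  intro rest
  induction rest with
  | nil =>
    intro pref dp res h hinv
    constructor
    · simpa using h
    · simpa using hinv
  | cons x rest ih =>
    intro pref dp res h hinv
    have hz : (pref ++ x :: rest).zip dp = pref.zip dp := zip_append_left pref (x :: rest) dp h
    have hstep : dpStep (pref ++ x :: rest) dp x = dp ++ [bestOf (pref.zip dp) x + 1] := by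
      unfold dpStep
      rw [hz]
    rw [List.foldl_cons, hstep, show pref ++ x :: rest = (pref ++ [x]) ++ rest from by simp]
    have hinv' : LPInv ((pref ++ [x]).zip (dp ++ [bestOf (pref.zip dp) x + 1])) (patStep res x) := by
      rw [List.zip_append h.symm]
      simpa using inv_step (pref.zip dp) res x hinv
    obtain ⟨hl, hi⟩ := ih (pref ++ [x]) (dp ++ [bestOf (pref.zip dp) x + 1]) (patStep res x)
      (by simp [h]) hinv'
    refine ⟨?_, hi⟩
    rw [hl]
    simp
    omega

lemma final_len (temp dp res : List Int) (hlen : dp.length = temp.length)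
    (h : LPInv (temp.zip dp) res) :
    (if dp.isEmpty then 0 else (PySem.List.max? dp (fun v => v)).getD 0) = (res.length : Int) := by
  obtain ⟨hsort, hlb, hwit⟩ := h
  cases dp with
  | nil =>
    simp only [List.isEmpty_nil, reduceIte]
    rcases Nat.eq_zero_or_pos res.length with h0 | hpos
    · simp [h0]
    · obtain ⟨p, hp, _, _⟩ := hwit 0 hpos
      simp at hp
  | cons d dp' =>
    obtain ⟨m, hm⟩ : ∃ m, PySem.List.max? (d :: dp') (fun v => v) = some m := by
      cases hmax : PySem.List.max? (d :: dp') (fun v => v) with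
      | none => rw [PySem.List.max?_eq_none_iff] at hmax; simp at hmax
      | some m => exact ⟨m, rfl⟩
    have hmem := PySem.List.max?_mem hm
    have hmax := PySem.List.max?_isMax hm
    obtain ⟨i, hi, hie⟩ := List.mem_iff_getElem.mp hmem
    have hziplen : i < (temp.zip (d :: dp')).length := by
      rw [List.length_zip]
      omega
    have hpairmem : (temp[i]'(by omega), (d :: dp')[i]) ∈ temp.zip (d :: dp') := by
      have hmm := List.getElem_mem hziplen
      rw [List.getElem_zip] at hmm
      exact hmm
    obtain ⟨h1m, h2m, _⟩ := hlb _ hpairmem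
    simp only at h1m h2m
    rw [hie] at h1m h2m
    have hpos : 0 < res.length := by omega
    obtain ⟨p, hp, hp2, _⟩ := hwit (res.length - 1) (by omega)
    obtain ⟨p1, p2⟩ := p
    have hpd : p2 ∈ (d :: dp') := (List.of_mem_zip hp).2
    have hpm : p2 ≤ m := hmax p2 hpd
    simp only at hp2
    simp only [hm]
    simp
    omega

-- ===== VERDICT (by name: the statement is the Claim_ definition above) =====
theorem minInsAndDel_spec : Claim_equal_minInsAndDel := by
  intro A B N M _hdom _hpre
  unfold Spec_minInsAndDel
  show minInsAndDel A B N M = minInsAndDel_alt A B N M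
  simp only [minInsAndDel, minInsAndDel_alt]
  rw [filter_eq]
  obtain ⟨hlen, hinv⟩ :=
    loop_bisim (filterB (PySem.Set.ofList B) A N) [] [] [] rfl
      ⟨List.Pairwise.nil, by simp, by simp⟩
  rw [List.nil_append] at hlen hinv
  have hfin := final_len (filterB (PySem.Set.ofList B) A N)
      ((filterB (PySem.Set.ofList B) A N).foldl (dpStep (filterB (PySem.Set.ofList B) A N)) [])
      ((filterB (PySem.Set.ofList B) A N).foldl patStep [])
      (by simpa using hlen) hinv
  rw [hfin]
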